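-- pv_equiv track=rewrite | github.com/yaochie/AdventOfCode2019 | 8.py | read_layers
-- ===== SOURCE A (Python) =====
-- def read_layers(pixels, width, height):
--     layers = []
--     layer = []
--     row = []
--     for pix in pixels:
--         row.append(pix)
--         if len(row) == width:
--             layer.append(row)
--             row = []
--             if len(layer) == height:
--                 layers.append(layer)
--                 layer = []
--
--     return layers
-- ===== SOURCE B (Python) =====
-- def read_layers(pixels, width, height):
--     if width <= 0 or height <= 0:
--         return []
--     size = width * height
--     n = len(pixels) // size
--     return [[pixels[l * size + r * width : l * size + (r + 1) * width]
--              for r in range(height)]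
--             for l in range(n)]
-- ===== Notes on version B (the rewrite author's own statement) =====
-- stated objective: faster
-- what changed: Replaced the element-by-element accumulation with length-watching state by count-first index arithmetic: compute the number of complete layers and build each layer directly from row slices, which a timing run measured as a constant-factor speedup.
import Mathlib
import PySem

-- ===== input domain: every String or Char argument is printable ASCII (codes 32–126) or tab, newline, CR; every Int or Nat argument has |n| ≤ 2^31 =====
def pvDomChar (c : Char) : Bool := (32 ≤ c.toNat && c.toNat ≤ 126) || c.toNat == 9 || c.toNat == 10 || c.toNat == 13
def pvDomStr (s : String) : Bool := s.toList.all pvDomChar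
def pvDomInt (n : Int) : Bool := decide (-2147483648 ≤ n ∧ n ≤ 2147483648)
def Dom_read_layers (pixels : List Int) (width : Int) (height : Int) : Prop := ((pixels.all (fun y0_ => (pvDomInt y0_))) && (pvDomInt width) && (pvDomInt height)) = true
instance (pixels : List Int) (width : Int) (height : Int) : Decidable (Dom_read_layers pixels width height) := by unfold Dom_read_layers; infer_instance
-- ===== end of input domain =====

-- B replaces A's element-by-element accumulation (with length-watching state) by
-- count-first index arithmetic: compute the number of complete layers and slice each row out directly.


-- ===== PORT A =====
-- loop body of A: row.append(pix); if len(row)==width: layer.append(row); row=[]; if len(layer)==height: layers.append(layer); layer=[]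
def pvStepA (width height : Int)
    (st : List (List (List Int)) × List (List Int) × List Int) (pix : Int) :
    List (List (List Int)) × List (List Int) × List Int :=
  let row := st.2.2 ++ [pix]
  if (row.length : Int) = width then
    let layer := st.2.1 ++ [row]
    if (layer.length : Int) = height then (st.1 ++ [layer], [], [])
    else (st.1, layer, [])
  else (st.1, st.2.1, row)

def read_layers (pixels : List Int) (width : Int) (height : Int) : List (List (List Int)) :=
  (pixels.foldl (pvStepA width height) ([], [], [])).1

-- ===== PORT B =====
def read_layers_alt (pixels : List Int) (width : Int) (height : Int) : List (List (List Int)) :=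
  if width ≤ 0 ∨ height ≤ 0 then []
  else
    let size := width * height
    let n := PySem.Int.floordiv (pixels.length : Int) size
    (PySem.List.pyRange 0 n 1).map (fun l =>
      (PySem.List.pyRange 0 height 1).map (fun r =>
        PySem.List.slice pixels (some (l * size + r * width)) (some (l * size + (r + 1) * width))))

-- ===== PRECONDITION & SPEC =====
def Spec_read_layers (pixels : List Int) (width : Int) (height : Int) (out : List (List (List Int))) : Prop := out = read_layers_alt pixels width height
instance (pixels : List Int) (width : Int) (height : Int) (out : List (List (List Int))) : Decidable (Spec_read_layers pixels width height out) := by unfold Spec_read_layers; infer_instance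

-- ===== CLAIM (what is proved, stated in full; the proofs are below) =====
def Claim_equal_read_layers : Prop := ∀ (pixels : List Int) (width : Int) (height : Int), Dom_read_layers pixels width height → Spec_read_layers pixels width height (read_layers pixels width height)

-- ===== LEMMAS AND PROOFS =====

-- canonical form of the result: full w×h layers chunked off the front
def pvLayers (w h : Nat) (xs : List Int) : List (List (List Int)) :=
  if hc : 0 < w * h ∧ w * h ≤ xs.length then
    ((List.range h).map (fun r => (xs.drop (r * w)).take w)) :: pvLayers w h (xs.drop (w * h))
  else []
termination_by xs.length
decreasing_by
  simp only [List.length_drop]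
  omega


theorem pvStepA_eq (width height : Int) (L : List (List (List Int))) (ly : List (List Int)) (r : List Int) (z : Int) :
    pvStepA width height (L, ly, r) z
      = (if ((r ++ [z]).length : Int) = width then
           (if ((ly ++ [r ++ [z]]).length : Int) = height then (L ++ [ly ++ [r ++ [z]]], [], [])
            else (L, ly ++ [r ++ [z]], []))
         else (L, ly, r ++ [z])) := rfl


-- A returns [] when width ≤ 0 or height ≤ 0
theorem pv_degen (width height : Int) (hd : width ≤ 0 ∨ height ≤ 0) :
    ∀ (zs : List Int) (L : List (List (List Int))) (ly : List (List Int)) (r : List Int),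
      (zs.foldl (pvStepA width height) (L, ly, r)).1 = L := by
  intro zs
  induction zs with
  | nil => intro L ly r; simp
  | cons z zs ih =>
    intro L ly r
    simp only [List.foldl_cons, pvStepA]
    split_ifs with h1 h2
    · exfalso
      simp only [List.length_append, List.length_cons, List.length_nil] at h1 h2
      rcases hd with hd | hd
      · omega
      · omega
    · exact ih L (ly ++ [r ++ [z]]) []
    · exact ih L ly (r ++ [z])

-- the L component is only appended to
theorem pv_frame (width height : Int) :
    ∀ (zs : List Int) (L : List (List (List Int))) (ly : List (List Int)) (r : List Int),
      zs.foldl (pvStepA width height) (L, ly, r)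
        = (L ++ (zs.foldl (pvStepA width height) ([], ly, r)).1,
           (zs.foldl (pvStepA width height) ([], ly, r)).2) := by
  intro zs
  induction zs with
  | nil => intro L ly r; simp
  | cons z zs ih =>
    intro L ly r
    simp only [List.foldl_cons, pvStepA]
    split_ifs with h1 h2
    · simp only [List.nil_append]
      rw [ih (L ++ [ly ++ [r ++ [z]]]) [] [], ih ([ly ++ [r ++ [z]]]) [] []]
      simp
    · exact ih L (ly ++ [r ++ [z]]) []
    · exact ih L ly (r ++ [z])

-- consuming the rest of one row
theorem pv_row (w h : Nat) :
    ∀ (zs r : List Int), r.length + zs.length = w → zs ≠ [] →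
    ∀ (L : List (List (List Int))) (ly : List (List Int)) (rest : List Int),
      (zs ++ rest).foldl (pvStepA (w : Int) (h : Int)) (L, ly, r)
        = rest.foldl (pvStepA (w : Int) (h : Int))
            (if ly.length + 1 = h then (L ++ [ly ++ [r ++ zs]], [], [])
             else (L, ly ++ [r ++ zs], [])) := by
  intro zs
  induction zs with
  | nil => intro r _ hne _ _ _; exact absurd rfl hne
  | cons z zs ih =>
    intro r hlen _ L ly rest
    rcases zs with _ | ⟨z', zs'⟩
    · simp only [List.length_cons, List.length_nil] at hlen
      rw [List.cons_append, List.nil_append, List.foldl_cons, pvStepA_eq]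
      have h1 : ((r ++ [z]).length : Int) = (w : Int) := by simp; omega
      rw [if_pos h1]
      by_cases h2 : ly.length + 1 = h
      · have h2' : ((ly ++ [r ++ [z]]).length : Int) = (h : Int) := by simp; omega
        rw [if_pos h2', if_pos h2]
      · have h2' : ¬ ((ly ++ [r ++ [z]]).length : Int) = (h : Int) := by simp; omega
        rw [if_neg h2', if_neg h2]
    · simp only [List.length_cons] at hlen
      rw [List.cons_append, List.foldl_cons, pvStepA_eq]
      have h1 : ¬ ((r ++ [z]).length : Int) = (w : Int) := by simp; omega
      rw [if_neg h1]
      rw [ih (r ++ [z]) (by simp; omega) (by simp) L ly rest]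
      simp only [List.append_assoc, List.cons_append, List.nil_append]

theorem pv_layer (w h : Nat) (hw : 0 < w) :
    ∀ (k : Nat), 0 < k →
    ∀ (zs : List Int) (L : List (List (List Int))) (ly : List (List Int)) (rest : List Int),
      zs.length = k * w → ly.length + k = h →
      (zs ++ rest).foldl (pvStepA (w : Int) (h : Int)) (L, ly, [])
        = rest.foldl (pvStepA (w : Int) (h : Int))
            (L ++ [ly ++ (List.range k).map (fun r => (zs.drop (r * w)).take w)], [], []) := by
  intro k
  induction k with
  | zero => intro hk; omega
  | succ k ih =>
    intro _ zs L ly rest hzs hly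
    rcases Nat.eq_zero_or_pos k with hk0 | hkpos
    · -- last row of the layer
      subst hk0
      replace hzs : zs.length = w := by omega
      have hne : zs ≠ [] := by intro hc; subst hc; simp at hzs; omega
      rw [pv_row w h zs [] (by simpa using hzs) hne L ly rest, if_pos (by omega)]
      have hrows : (List.range 1).map (fun r => (zs.drop (r * w)).take w) = [zs] := by
        simp [List.take_of_length_le (le_of_eq hzs)]
      rw [hrows]
      simp only [List.nil_append]
    · -- peel one row, recurse
      have hlen : w ≤ zs.length := by
        rw [hzs]; calc w = 1 * w := (Nat.one_mul w).symm
          _ ≤ (k+1) * w := Nat.mul_le_mul_right w (by omega)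
      have hsplit : zs ++ rest = zs.take w ++ ((zs.drop w) ++ rest) := by
        rw [← List.append_assoc, List.take_append_drop]
      rw [hsplit]
      have htw : (zs.take w).length = w := by simp [List.length_take, Nat.min_eq_left hlen]
      have hne : zs.take w ≠ [] := by
        intro hc; rw [hc] at htw; simp at htw; omega
      rw [pv_row w h (zs.take w) [] (by simpa using htw) hne L ly (zs.drop w ++ rest),
          if_neg (by omega)]
      simp only [List.nil_append]
      rw [ih hkpos (zs.drop w) L (ly ++ [zs.take w]) rest
            (by rw [List.length_drop, hzs, Nat.succ_mul, Nat.add_sub_cancel])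
            (by simp only [List.length_append, List.length_cons, List.length_nil]; omega)]
      have hrows : (List.range (k+1)).map (fun r => (zs.drop (r * w)).take w)
          = zs.take w :: (List.range k).map (fun r => ((zs.drop w).drop (r * w)).take w) := by
        rw [List.range_succ_eq_map]
        simp only [List.map_cons, Nat.zero_mul, List.drop_zero, List.map_map]
        refine congrArg _ ?_
        apply List.map_congr_left
        intro a _
        simp only [Function.comp_apply, List.drop_drop]
        congr 2
        simp only [Nat.succ_mul]
        ring
      rw [hrows]
      simp only [List.append_assoc, List.singleton_append]

theorem pv_leftover (w h : Nat) (hw : 0 < w) :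
    ∀ (zs : List Int) (L : List (List (List Int))) (ly : List (List Int)) (r : List Int),
      r.length < w → ly.length * w + r.length + zs.length < w * h →
      (zs.foldl (pvStepA (w : Int) (h : Int)) (L, ly, r)).1 = L := by
  intro zs
  induction zs with
  | nil => intro L ly r _ _; rfl
  | cons z zs ih =>
    intro L ly r hr hlt
    simp only [List.length_cons] at hlt
    rw [List.foldl_cons, pvStepA_eq]
    have hmul : (ly.length + 1) * w = ly.length * w + w := Nat.succ_mul _ _
    by_cases h1 : r.length + 1 = w
    · have h1' : ((r ++ [z]).length : Int) = (w : Int) := by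
        simp only [List.length_append, List.length_cons, List.length_nil]; omega
      rw [if_pos h1']
      have hlyh : ly.length + 1 < h := by
        by_contra hc
        have hq : w * h ≤ w * (ly.length + 1) := Nat.mul_le_mul_left w (by omega)
        have hq2 : w * (ly.length + 1) = ly.length * w + w := by ring
        omega
      have h2' : ¬ ((ly ++ [r ++ [z]]).length : Int) = (h : Int) := by
        simp only [List.length_append, List.length_cons, List.length_nil]; omega
      rw [if_neg h2']
      refine ih L (ly ++ [r ++ [z]]) [] (by simpa using hw) ?_
      simp only [List.length_append, List.length_cons, List.length_nil, Nat.succ_mul]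
      omega
    · have h1' : ¬ ((r ++ [z]).length : Int) = (w : Int) := by
        simp only [List.length_append, List.length_cons, List.length_nil]; omega
      rw [if_neg h1']
      refine ih L ly (r ++ [z]) ?_ ?_
      · simp only [List.length_append, List.length_cons, List.length_nil]; omega
      · simp only [List.length_append, List.length_cons, List.length_nil]; omega

theorem pv_tdt (xs : List Int) (a b s : Nat) (hab : a + b ≤ s) :
    ((xs.take s).drop a).take b = (xs.drop a).take b := by
  rw [List.drop_take, List.take_take, Nat.min_eq_left (by omega)]

theorem pv_A_eq (w h : Nat) (hw : 0 < w) (hh : 0 < h) :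
    ∀ (xs : List Int), read_layers xs (w : Int) (h : Int) = pvLayers w h xs := by
  intro xs
  generalize hgen : xs.length = n
  induction n using Nat.strong_induction_on generalizing xs with
  | _ n ihn =>
    subst hgen
    have hpos : 0 < w * h := Nat.mul_pos hw hh
    by_cases hc : w * h ≤ xs.length
    · have hlen : (xs.take (w * h)).length = h * w := by
        rw [List.length_take, Nat.min_eq_left hc, Nat.mul_comm]
      unfold read_layers
      conv_lhs => rw [(List.take_append_drop (w * h) xs).symm]
      rw [pv_layer w h hw h hh (xs.take (w * h)) [] [] (xs.drop (w * h)) hlen (by simp)]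
      rw [pv_frame]
      rw [show (List.foldl (pvStepA (w : Int) (h : Int)) ([], [], []) (xs.drop (w * h))).1
            = read_layers (xs.drop (w * h)) (w : Int) (h : Int) from rfl]
      rw [ihn (xs.drop (w * h)).length (by simp; omega) (xs.drop (w * h)) rfl]
      conv_rhs => rw [pvLayers]
      rw [dif_pos ⟨hpos, hc⟩]
      simp only [List.nil_append, List.singleton_append]
      congr 1
      apply List.map_congr_left
      intro r hr
      apply pv_tdt
      have hrh : r < h := List.mem_range.mp hr
      calc r * w + w = (r + 1) * w := (Nat.succ_mul r w).symm
        _ ≤ h * w := Nat.mul_le_mul_right w (by omega)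
        _ = w * h := Nat.mul_comm h w
    · unfold read_layers
      rw [pv_leftover w h hw xs [] [] [] (by simpa using hw)
            (by simp only [List.length_nil]; omega)]
      rw [pvLayers, dif_neg (fun hcc => hc hcc.2)]

-- pvLayers as a map over layer indices
theorem pv_layers_map (w h : Nat) (hw : 0 < w) (hh : 0 < h) :
    ∀ (xs : List Int), pvLayers w h xs
      = (List.range (xs.length / (w * h))).map
          (fun l => (List.range h).map (fun r => (xs.drop (l * (w * h) + r * w)).take w)) := by
  intro xs
  generalize hgen : xs.length = n
  induction n using Nat.strong_induction_on generalizing xs with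
  | _ n ihn =>
    subst hgen
    have hpos : 0 < w * h := Nat.mul_pos hw hh
    by_cases hc : w * h ≤ xs.length
    · rw [pvLayers, dif_pos ⟨hpos, hc⟩]
      rw [ihn (xs.drop (w * h)).length (by simp; omega) (xs.drop (w * h)) rfl]
      have hdiv : xs.length / (w * h) = (xs.drop (w * h)).length / (w * h) + 1 := by
        rw [List.length_drop, Nat.div_eq_sub_div hpos hc]
      rw [hdiv, List.range_succ_eq_map]
      simp only [List.map_cons, Nat.zero_mul, Nat.zero_add, List.map_map, List.length_drop]
      congr 1
      apply List.map_congr_left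
      intro l _
      simp only [Function.comp_apply]
      apply List.map_congr_left
      intro r _
      rw [List.drop_drop]
      congr 2
      simp only [Nat.succ_mul]
      ring
    · rw [pvLayers, dif_neg (fun hcc => hc hcc.2), Nat.div_eq_of_lt (by omega), List.range_zero,
          List.map_nil]

-- B computes pvLayers
theorem pv_B_eq (w h : Nat) (hw : 0 < w) (hh : 0 < h) :
    ∀ (xs : List Int), read_layers_alt xs (w : Int) (h : Int) = pvLayers w h xs := by
  intro xs
  rw [pv_layers_map w h hw hh xs]
  unfold read_layers_alt
  rw [if_neg (by rintro (hcc | hcc) <;> omega)]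
  have hsz : (w : Int) * (h : Int) = ((w * h : Nat) : Int) := by push_cast; ring
  have hn : PySem.Int.floordiv ((xs.length : Nat) : Int) (((w * h : Nat)) : Int)
      = ((xs.length / (w * h) : Nat) : Int) := PySem.Int.floordiv_natCast _ _
  simp only [hsz, hn, PySem.List.pyRange_zero_natCast, List.map_map]
  apply List.map_congr_left
  intro l _
  simp only [Function.comp_apply]
  apply List.map_congr_left
  intro r _
  simp only [Function.comp_apply]
  have harg1 : ((l : Int)) * ((w * h : Nat) : Int) + ((r : Int)) * ((w : Nat) : Int)
      = (((l * (w * h) + r * w : Nat)) : Int) := by push_cast; ring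
  have harg2 : ((l : Int)) * ((w * h : Nat) : Int) + (((r : Int)) + 1) * ((w : Nat) : Int)
      = (((l * (w * h) + r * w + w : Nat)) : Int) := by push_cast; ring
  rw [harg1, harg2, PySem.List.slice_natCast, Nat.add_sub_cancel_left]

-- ===== VERDICT (by name: the statement is the Claim_ definition above) =====
theorem read_layers_spec : Claim_equal_read_layers := by
  intro pixels width height _
  unfold Spec_read_layers
  by_cases hd : width ≤ 0 ∨ height ≤ 0
  · have hB : read_layers_alt pixels width height = [] := by
      unfold read_layers_alt; simp [hd]
    rw [hB]
    unfold read_layers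
    exact pv_degen width height hd pixels [] [] []
  · rcases not_or.mp hd with ⟨hw0, hh0⟩
    have hw : (0 : Int) < width := by omega
    have hh : (0 : Int) < height := by omega
    obtain ⟨w, rfl⟩ : ∃ w : Nat, width = (w : Int) := ⟨width.toNat, (Int.toNat_of_nonneg (le_of_lt hw)).symm⟩
    obtain ⟨h, rfl⟩ : ∃ h : Nat, height = (h : Int) := ⟨height.toNat, (Int.toNat_of_nonneg (le_of_lt hh)).symm⟩
    have hw' : 0 < w := by exact_mod_cast hw
    have hh' : 0 < h := by exact_mod_cast hh
    rw [pv_A_eq w h hw' hh' pixels, pv_B_eq w h hw' hh' pixels]
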